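-- pv_equiv track=rewrite | github.com/CharlesFee/CS115-Code | life_starter/life.py | innerReverse
-- ===== SOURCE A (Python) =====
-- def createOneRow(width):
--     """Returns one row of zeros of width "width"...
--        You should use this in your
--        createBoard(width, height) function."""
--     row = []
--     for col in range(width):
--         row += [0]
--     return row
--
-- def createBoard(width, height):
--     "creates a new board with the given dimensions"
--
--     A = []
--
--     for row in range(height):
--         A+=[createOneRow(width)]
--
--     return A
--
-- def copy(A):
--     height = len(A)
--     width = len(A[0])
--     newA = createBoard(len(A[0]),len(A))
--     for row in range(height):
--         for col in range(width):
--             if A[row][col] != newA[row][col]: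
--                 newA[row][col] = 1
--     return newA
--
-- def innerReverse(A):
--     newA=copy(A)
--     height = len(newA)
--     width = len(newA[0])
--     for row in range(height):
--         if row!= 0 and row != height-1:
--             for col in range(width):
--                 if col !=0 and col != width-1:
--                     if newA[row][col] == 0:
--                         newA[row][col]=1
--                     else:
--                         newA[row][col]=0
--     return newA
-- ===== SOURCE B (Python) =====
-- def innerReverse(A):
--     height, width = len(A), len(A[0])
--
--     def norm(row):
--         return [int(x != 0) for x in row[:width]]
--
--     def mid(row):
--         if width <= 2:
--             return norm(row)
--         head = int(row[0] != 0)
--         last = int(row[width - 1] != 0)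
--         return [head] + [int(x == 0) for x in row[1:width - 1]] + [last]
--
--     if height <= 2:
--         return [norm(r) for r in A]
--     return [norm(A[0])] + [mid(r) for r in A[1:height - 1]] + [norm(A[height - 1])]
-- ===== Notes on version B (the rewrite author's own statement) =====
-- stated objective: alternative
-- what changed: Replaces A's mutate-in-place index loops (build a zero board, copy-normalize cell by cell, then flip interior cells with nested range loops and guards) by a structural border/interior decomposition: the board is split by slicing into first row, middle rows and last row, each row into first cell, middle slice and last cell, and the parts are normalized/flipped and concatenated.
import Mathlib
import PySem

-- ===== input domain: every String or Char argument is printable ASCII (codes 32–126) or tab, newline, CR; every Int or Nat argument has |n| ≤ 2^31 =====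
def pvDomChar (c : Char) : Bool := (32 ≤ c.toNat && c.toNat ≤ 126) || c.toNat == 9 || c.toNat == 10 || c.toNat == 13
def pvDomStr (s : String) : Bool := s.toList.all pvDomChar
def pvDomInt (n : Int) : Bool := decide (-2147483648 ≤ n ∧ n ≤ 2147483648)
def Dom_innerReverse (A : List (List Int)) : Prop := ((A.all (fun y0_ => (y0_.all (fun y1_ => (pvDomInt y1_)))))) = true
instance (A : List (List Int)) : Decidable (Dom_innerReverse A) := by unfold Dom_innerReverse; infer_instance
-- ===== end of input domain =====

-- B replaces A's copy-then-flip-in-place index loops by a structural border/interior slicing decomposition (objective: alternative).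


-- ===== PORT A =====
def createOneRow (width : Int) : List Int :=
  (PySem.List.pyRange 0 width 1).foldl (fun row _ => row ++ [0]) []

def createBoard (width height : Int) : List (List Int) :=
  (PySem.List.pyRange 0 height 1).foldl (fun B _ => B ++ [createOneRow width]) []

def pyCopy (A : List (List Int)) : List (List Int) :=
  let height : Int := A.length
  let width : Int := ((PySem.List.pyGetD A 0 []).length : Int)
  let newA := createBoard width height
  (PySem.List.pyRange 0 height 1).foldl (fun newA row =>
    (PySem.List.pyRange 0 width 1).foldl (fun newA col =>
      if PySem.List.pyGetD (PySem.List.pyGetD A row []) col 0 ≠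
         PySem.List.pyGetD (PySem.List.pyGetD newA row []) col 0 then
        PySem.List.pySetD newA row (PySem.List.pySetD (PySem.List.pyGetD newA row []) col 1)
      else newA) newA) newA

def innerReverse (A : List (List Int)) : List (List Int) :=
  let newA0 := pyCopy A
  let height : Int := newA0.length
  let width : Int := ((PySem.List.pyGetD newA0 0 []).length : Int)
  (PySem.List.pyRange 0 height 1).foldl (fun newA row =>
    if row ≠ 0 ∧ row ≠ height - 1 then
      (PySem.List.pyRange 0 width 1).foldl (fun newA col =>
        if col ≠ 0 ∧ col ≠ width - 1 then
          if PySem.List.pyGetD (PySem.List.pyGetD newA row []) col 0 = 0 then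
            PySem.List.pySetD newA row (PySem.List.pySetD (PySem.List.pyGetD newA row []) col 1)
          else
            PySem.List.pySetD newA row (PySem.List.pySetD (PySem.List.pyGetD newA row []) col 0)
        else newA) newA
    else newA) newA0

-- ===== PORT B =====
def altNorm (width : Int) (row : List Int) : List Int :=
  (PySem.List.slice row none (some width)).map (fun x => if x ≠ 0 then (1 : Int) else 0)

def altMid (width : Int) (row : List Int) : List Int :=
  if width ≤ 2 then altNorm width row
  else
    let head : Int := if PySem.List.pyGetD row 0 0 ≠ 0 then 1 else 0
    let last : Int := if PySem.List.pyGetD row (width - 1) 0 ≠ 0 then 1 else 0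
    [head] ++ (PySem.List.slice row (some 1) (some (width - 1))).map
        (fun x => if x = 0 then (1 : Int) else 0) ++ [last]

def innerReverse_alt (A : List (List Int)) : List (List Int) :=
  let height : Int := A.length
  let width : Int := ((PySem.List.pyGetD A 0 []).length : Int)
  if height ≤ 2 then A.map (altNorm width)
  else [altNorm width (PySem.List.pyGetD A 0 [])]
       ++ (PySem.List.slice A (some 1) (some (height - 1))).map (altMid width)
       ++ [altNorm width (PySem.List.pyGetD A (height - 1) [])]

-- ===== PRECONDITION & SPEC =====
-- Pre_ excludes exactly the inputs on which the Python A raises IndexError: the empty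
-- board (len(A[0])) and ragged boards where some row is shorter than the first row
-- (A[row][col] for col < len(A[0])).
def Pre_innerReverse (A : List (List Int)) : Prop :=
  A ≠ [] ∧ ∀ r ∈ A, (A.headD []).length ≤ r.length
instance (A : List (List Int)) : Decidable (Pre_innerReverse A) := by
  unfold Pre_innerReverse; infer_instance
def pvWitness_innerReverse : List (List Int) := [[0, 1, 2], [5, 0, 0], [0, 3, 0]]

def Spec_innerReverse (A : List (List Int)) (out : List (List Int)) : Prop := out = innerReverse_alt A
instance (A : List (List Int)) (out : List (List Int)) : Decidable (Spec_innerReverse A out) := by unfold Spec_innerReverse; infer_instance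

-- ===== CLAIM (what is proved, stated in full; the proofs are below) =====
def Claim_equal_innerReverse : Prop := ∀ (A : List (List Int)), Dom_innerReverse A → Pre_innerReverse A → Spec_innerReverse A (innerReverse A)

-- ===== LEMMAS AND PROOFS =====

-- canonical per-cell description of the result, used only by the proofs below
def pvCanon (A : List (List Int)) : List (List Int) :=
  let height : Int := A.length
  let width : Int := ((PySem.List.pyGetD A 0 []).length : Int)
  (PySem.List.pyRange 0 height 1).map (fun i =>
    (PySem.List.pyRange 0 width 1).map (fun j =>
      let v : Int := if PySem.List.pyGetD (PySem.List.pyGetD A i []) j 0 ≠ 0 then 1 else 0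
      if 0 < i ∧ i < height - 1 ∧ 0 < j ∧ j < width - 1 then 1 - v else v))

-- setting an index to its current value is the identity
theorem pv_set_getD_self {α : Type} (l : List α) (i : ℕ) (d : α) :
    l.set i (l.getD i d) = l := by
  apply List.ext_getElem
  · simp
  · intro k hk _
    rw [List.getElem_set]
    split_ifs with he
    · subst he
      have h2 : i < l.length := by simpa using hk
      simp [List.getD_eq_getElem?_getD, List.getElem?_eq_getElem h2]
    · rfl

-- foldl under an invariant: steps may be replaced by pointwise-equal steps
theorem pv_foldl_inv_congr {α β : Type} (Inv : α → Prop) (f g : α → β → α) :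
    ∀ (l : List β) (a : α), Inv a →
    (∀ x b, b ∈ l → Inv x → f x b = g x b) →
    (∀ x b, b ∈ l → Inv x → Inv (f x b)) →
    l.foldl f a = l.foldl g a := by
  intro l
  induction l with
  | nil => intros; rfl
  | cons b t ih =>
    intro a ha hfg hpres
    simp only [List.foldl_cons]
    rw [← hfg a b (by simp) ha]
    exact ih (f a b) (hpres a b (by simp) ha)
      (fun x c hc hx => hfg x c (by simp [hc]) hx)
      (fun x c hc hx => hpres x c (by simp [hc]) hx)

-- a fold that rewrites slot j from its own current content, for j over range n
theorem pv_foldl_range_set {α : Type} (g : ℕ → α → α) (d : α) :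
    ∀ (n : ℕ) (r : List α), n ≤ r.length →
    (List.range n).foldl (fun cur j => cur.set j (g j (cur.getD j d))) r
      = r.mapIdx (fun j x => if j < n then g j x else x) := by
  intro n
  induction n with
  | zero =>
    intro r _
    apply List.ext_getElem
    · simp
    · intro k hk hk'
      simp [List.getElem_mapIdx]
  | succ n ih =>
    intro r hn
    rw [List.range_succ, List.foldl_append, ih r (by omega)]
    simp only [List.foldl_cons, List.foldl_nil]
    have hget : (r.mapIdx (fun j x => if j < n then g j x else x)).getD n d = r[n]'(by omega) := by
      rw [List.getD_eq_getElem?_getD, List.getElem?_eq_getElem (by simpa using (by omega : n < r.length))]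
      simp [List.getElem_mapIdx]
    rw [hget]
    apply List.ext_getElem
    · simp
    · intro k hk hk'
      rw [List.getElem_set]
      split_ifs with he
      · subst he
        simp [List.getElem_mapIdx]
      · simp only [List.getElem_mapIdx]
        by_cases h2 : k < n
        · have h3 : k < n + 1 := by omega
          simp [h2, h3]
        · have h3 : ¬ k < n + 1 := by omega
          simp [h2, h3]

-- a fold that only rewrites row i of a board, from that row's current content
theorem pv_foldl_set_row {α β : Type} (i : ℕ) (d : List α) (s : List α → β → List α) :
    ∀ (l : List β) (B : List (List α)), i < B.length →
    l.foldl (fun B j => B.set i (s (B.getD i d) j)) B = B.set i (l.foldl s (B.getD i d)) := by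
  intro l
  induction l with
  | nil =>
    intro B _
    simp only [List.foldl_nil]
    exact (pv_set_getD_self B i d).symm
  | cons b t ih =>
    intro B hi
    simp only [List.foldl_cons]
    rw [ih (B.set i (s (B.getD i d) b)) (by simpa using hi)]
    have : (B.set i (s (B.getD i d) b)).getD i d = s (B.getD i d) b := by
      rw [List.getD_eq_getElem?_getD, List.getElem?_eq_getElem (by simpa using hi)]
      simp
    rw [this, List.set_set]

theorem pv_mapIdx_replicate {α β : Type} (n : ℕ) (x : α) (f : ℕ → α → β) :
    (List.replicate n x).mapIdx f = (List.range n).map (fun i => f i x) := by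
  apply List.ext_getElem
  · simp
  · intro k hk hk'
    simp [List.getElem_mapIdx]

theorem pv_foldl_append_one {α β : Type} (x : α) :
    ∀ (l : List β) (acc : List α),
    l.foldl (fun r _ => r ++ [x]) acc = acc ++ List.replicate l.length x := by
  intro l
  induction l with
  | nil => intro acc; simp
  | cons b t ih =>
    intro acc
    simp only [List.foldl_cons, List.length_cons]
    rw [ih (acc ++ [x])]
    simp [List.replicate_succ]

theorem pv_createOneRow (w : ℕ) : createOneRow (w : Int) = List.replicate w 0 := by
  rw [createOneRow, pv_foldl_append_one]
  simp [PySem.List.pyRange_zero_natCast]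

theorem pv_createBoard (w h : ℕ) :
    createBoard (w : Int) (h : Int) = List.replicate h (List.replicate w 0) := by
  rw [createBoard, pv_foldl_append_one]
  simp [PySem.List.pyRange_zero_natCast, pv_createOneRow]

-- the copy() inner loop builds the normalized row
theorem pv_copyrow (w : ℕ) (a : ℕ → Int) :
    (List.range w).foldl
      (fun r j => if a j ≠ r.getD j 0 then r.set j 1 else r)
      (List.replicate w 0)
    = (List.range w).map (fun j => if a j ≠ 0 then (1 : Int) else 0) := by
  have hc : (List.range w).foldl
      (fun r j => if a j ≠ r.getD j 0 then r.set j 1 else r)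
      (List.replicate w 0)
      = (List.range w).foldl
      (fun r j => r.set j (if a j ≠ r.getD j 0 then 1 else r.getD j 0))
      (List.replicate w 0) := by
    apply PySem.List.foldl_congr_mem
    intro r j _
    split_ifs with h
    · rfl
    · exact (pv_set_getD_self r j 0).symm
  rw [hc, pv_foldl_range_set (fun j x => if a j ≠ x then 1 else x) 0 w _ (by simp),
      pv_mapIdx_replicate]
  apply List.map_congr_left
  intro j hj
  simp [List.mem_range.mp hj]

-- the whole copy() loop nest builds the normalized board
theorem pv_copyboard (h w : ℕ) (a : ℕ → ℕ → Int) :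
    (List.range h).foldl
      (fun B i => (List.range w).foldl
        (fun B j => if a i j ≠ (B.getD i []).getD j 0
                    then B.set i ((B.getD i []).set j 1) else B) B)
      (List.replicate h (List.replicate w 0))
    = (List.range h).map (fun i => (List.range w).map (fun j => if a i j ≠ 0 then (1 : Int) else 0)) := by
  have hrow : ∀ (i : ℕ) (B : List (List Int)), i < B.length →
      (List.range w).foldl
        (fun B j => if a i j ≠ (B.getD i []).getD j 0
                    then B.set i ((B.getD i []).set j 1) else B) B
      = B.set i ((List.range w).foldl
          (fun r j => if a i j ≠ r.getD j 0 then r.set j 1 else r) (B.getD i [])) := by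
    intro i B hi
    have hc : (List.range w).foldl
        (fun B j => if a i j ≠ (B.getD i []).getD j 0
                    then B.set i ((B.getD i []).set j 1) else B) B
        = (List.range w).foldl
        (fun B j => B.set i (if a i j ≠ (B.getD i []).getD j 0
                             then (B.getD i []).set j 1 else B.getD i [])) B := by
      apply PySem.List.foldl_congr_mem
      intro B j _
      by_cases hcond : a i j ≠ (B.getD i []).getD j 0
      · rw [if_pos hcond, if_pos hcond]
      · rw [if_neg hcond, if_neg hcond]
        exact (pv_set_getD_self B i []).symm
    rw [hc]
    exact pv_foldl_set_row i []
      (fun r j => if a i j ≠ r.getD j 0 then r.set j 1 else r) (List.range w) B hi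
  have houter : (List.range h).foldl
      (fun B i => (List.range w).foldl
        (fun B j => if a i j ≠ (B.getD i []).getD j 0
                    then B.set i ((B.getD i []).set j 1) else B) B)
      (List.replicate h (List.replicate w 0))
      = (List.range h).foldl
      (fun B i => B.set i ((fun i r => (List.range w).foldl
          (fun r j => if a i j ≠ r.getD j 0 then r.set j 1 else r) r) i (B.getD i [])))
      (List.replicate h (List.replicate w 0)) := by
    apply pv_foldl_inv_congr (fun B => B.length = h)
    · simp
    · intro B i hi hB
      exact hrow i B (by rw [hB]; exact List.mem_range.mp hi)
    · intro B i hi hB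
      rw [hrow i B (by rw [hB]; exact List.mem_range.mp hi)]
      simpa using hB
  rw [houter]
  refine (pv_foldl_range_set
      (fun i r => (List.range w).foldl
        (fun r j => if a i j ≠ r.getD j 0 then r.set j 1 else r) r) [] h
      (List.replicate h (List.replicate w 0)) (by simp)).trans ?_
  rw [pv_mapIdx_replicate]
  apply List.map_congr_left
  intro i hi
  simp only [List.mem_range.mp hi, if_pos]
  exact pv_copyrow w (a i)

theorem pv_copy_eq (A : List (List Int)) :
    pyCopy A = (List.range A.length).map (fun i =>
      (List.range (A.getD 0 []).length).map (fun j =>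
        if (A.getD i []).getD j 0 ≠ 0 then (1 : Int) else 0)) := by
  rw [pyCopy]
  simp only [PySem.List.pyGetD_zero]
  rw [pv_createBoard]
  simp only [PySem.List.pyRange_zero_natCast, List.foldl_map,
    PySem.List.pyGetD_natCast, PySem.List.pySetD_natCast]
  exact pv_copyboard A.length (A.getD 0 []).length (fun i j => (A.getD i []).getD j 0)

theorem pv_mapIdx_map_range {α β : Type} (n : ℕ) (F : ℕ → α) (G : ℕ → α → β) :
    ((List.range n).map F).mapIdx G = (List.range n).map (fun i => G i (F i)) := by
  apply List.ext_getElem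
  · simp
  · intro k hk hk'
    simp [List.getElem_mapIdx]

-- the flip pass on a rectangular board flips exactly the cells passing both guards
theorem pv_flipboard (h w : ℕ) (ci cj : ℕ → Prop) [DecidablePred ci] [DecidablePred cj]
    (B : List (List Int)) (hB : B.length = h) (hrows : ∀ r ∈ B, r.length = w) :
    (List.range h).foldl
      (fun B i => if ci i then
        (List.range w).foldl
          (fun B j => if cj j then
            (if (B.getD i []).getD j 0 = 0
             then B.set i ((B.getD i []).set j 1)
             else B.set i ((B.getD i []).set j 0))
           else B) B
       else B) B
    = B.mapIdx (fun i r => if ci i then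
        r.mapIdx (fun j x => if cj j then (if x = 0 then (1 : Int) else 0) else x) else r) := by
  have hrowfold : ∀ (i : ℕ) (B : List (List Int)), i < B.length →
      (List.range w).foldl
        (fun B j => if cj j then
          (if (B.getD i []).getD j 0 = 0
           then B.set i ((B.getD i []).set j 1)
           else B.set i ((B.getD i []).set j 0))
         else B) B
      = B.set i ((List.range w).foldl
          (fun r j => r.set j (if cj j then (if r.getD j 0 = 0 then (1 : Int) else 0) else r.getD j 0))
          (B.getD i [])) := by
    intro i B hi
    have hc : (List.range w).foldl
        (fun B j => if cj j then
          (if (B.getD i []).getD j 0 = 0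
           then B.set i ((B.getD i []).set j 1)
           else B.set i ((B.getD i []).set j 0))
         else B) B
        = (List.range w).foldl
        (fun B j => B.set i ((B.getD i []).set j
            (if cj j then (if (B.getD i []).getD j 0 = 0 then (1 : Int) else 0)
             else (B.getD i []).getD j 0))) B := by
      apply PySem.List.foldl_congr_mem
      intro B j _
      by_cases hcj : cj j
      · rw [if_pos hcj, if_pos hcj]
        by_cases hz : (B.getD i []).getD j 0 = 0
        · rw [if_pos hz, if_pos hz]
        · rw [if_neg hz, if_neg hz]
      · rw [if_neg hcj, if_neg hcj, pv_set_getD_self (B.getD i []) j 0]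
        exact (pv_set_getD_self B i []).symm
    rw [hc]
    exact pv_foldl_set_row i []
      (fun r j => r.set j (if cj j then (if r.getD j 0 = 0 then (1 : Int) else 0) else r.getD j 0))
      (List.range w) B hi
  have houter : (List.range h).foldl
      (fun B i => if ci i then
        (List.range w).foldl
          (fun B j => if cj j then
            (if (B.getD i []).getD j 0 = 0
             then B.set i ((B.getD i []).set j 1)
             else B.set i ((B.getD i []).set j 0))
           else B) B
       else B) B
      = (List.range h).foldl
      (fun B i => B.set i ((fun i r => if ci i then
          (List.range w).foldl
            (fun r j => r.set j (if cj j then (if r.getD j 0 = 0 then (1 : Int) else 0) else r.getD j 0)) r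
          else r) i (B.getD i []))) B := by
    apply pv_foldl_inv_congr (fun B => B.length = h)
    · exact hB
    · intro B i hi hBl
      by_cases hci : ci i
      · rw [if_pos hci]
        simp only [hci, if_pos]
        exact hrowfold i B (by rw [hBl]; exact List.mem_range.mp hi)
      · rw [if_neg hci]
        simp only [hci, if_neg, not_false_iff]
        exact (pv_set_getD_self B i []).symm
    · intro B i hi hBl
      by_cases hci : ci i
      · rw [if_pos hci, hrowfold i B (by rw [hBl]; exact List.mem_range.mp hi)]
        simpa using hBl
      · rw [if_neg hci]
        exact hBl
  rw [houter]
  refine (pv_foldl_range_set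
      (fun i r => if ci i then
          (List.range w).foldl
            (fun r j => r.set j (if cj j then (if r.getD j 0 = 0 then (1 : Int) else 0) else r.getD j 0)) r
          else r) [] h B (by omega)).trans ?_
  apply List.ext_getElem
  · simp
  · intro k hk hk'
    simp only [List.getElem_mapIdx]
    have hkh : k < h := by simpa [hB] using hk'
    simp only [hkh, if_pos]
    by_cases hci : ci k
    · simp only [hci, if_pos]
      have hrl : (B[k]'(by omega)).length = w := hrows _ (List.getElem_mem _)
      refine (pv_foldl_range_set
          (fun j x => if cj j then (if x = 0 then (1 : Int) else 0) else x) 0 w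
          (B[k]'(by omega)) (by omega)).trans ?_
      apply List.ext_getElem
      · simp
      · intro j hj hj'
        simp only [List.getElem_mapIdx]
        have hjw : j < w := by rw [← hrl]; simpa using hj'
        simp [hjw]
    · simp only [hci, if_neg, not_false_iff]

-- A's port equals the canonical per-cell form
theorem pv_innerReverse_canon (A : List (List Int)) : innerReverse A = pvCanon A := by
  by_cases hA : A = []
  · subst hA; decide
  · have hlen : 0 < A.length := List.length_pos_of_ne_nil hA
    simp only [innerReverse, pvCanon]
    rw [pv_copy_eq]
    have hC0 : ((List.range A.length).map (fun i => (List.range (A.getD 0 []).length).map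
          (fun j => if (A.getD i []).getD j 0 ≠ 0 then (1 : Int) else 0))).getD 0 []
        = (List.range (A.getD 0 []).length).map
            (fun j => if (A.getD 0 []).getD j 0 ≠ 0 then (1 : Int) else 0) := by
      rw [List.getD_eq_getElem?_getD, List.getElem?_eq_getElem (by simpa using hlen)]
      simp
    simp only [PySem.List.pyGetD_zero, List.length_map, List.length_range]
    rw [hC0]
    simp only [List.length_map, List.length_range, PySem.List.pyRange_zero_natCast,
      List.foldl_map, List.map_map, Function.comp_def,
      PySem.List.pyGetD_natCast, PySem.List.pySetD_natCast]
    rw [pv_flipboard A.length (A.getD 0 []).length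
      (fun i => (i : Int) ≠ 0 ∧ (i : Int) ≠ (A.length : Int) - 1)
      (fun j => (j : Int) ≠ 0 ∧ (j : Int) ≠ ((A.getD 0 []).length : Int) - 1)
      _ (by simp) (by intro r hr; simp only [List.mem_map] at hr; obtain ⟨i, _, rfl⟩ := hr; simp)]
    rw [pv_mapIdx_map_range]
    apply List.map_congr_left
    intro i hi
    have hih : i < A.length := List.mem_range.mp hi
    by_cases hci : (i : Int) ≠ 0 ∧ (i : Int) ≠ (A.length : Int) - 1
    · rw [if_pos hci, pv_mapIdx_map_range]
      apply List.map_congr_left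
      intro j hj
      have hjw : j < (A.getD 0 []).length := List.mem_range.mp hj
      by_cases hcj : (j : Int) ≠ 0 ∧ (j : Int) ≠ ((A.getD 0 []).length : Int) - 1
      · rw [if_pos hcj]
        have hcond : 0 < (i : Int) ∧ (i : Int) < (A.length : Int) - 1 ∧
            0 < (j : Int) ∧ (j : Int) < ((A.getD 0 []).length : Int) - 1 := by
          obtain ⟨h1, h2⟩ := hci
          obtain ⟨h3, h4⟩ := hcj
          omega
        rw [if_pos hcond]
        have hflip : ∀ (x : Int),
            (if (if x ≠ 0 then (1 : Int) else 0) = 0 then (1 : Int) else 0)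
            = 1 - (if x ≠ 0 then (1 : Int) else 0) := by
          intro x
          by_cases hx : x ≠ 0 <;> simp [hx]
        exact hflip _
      · rw [if_neg hcj]
        have hcond : ¬ (0 < (i : Int) ∧ (i : Int) < (A.length : Int) - 1 ∧
            0 < (j : Int) ∧ (j : Int) < ((A.getD 0 []).length : Int) - 1) := by
          intro hc
          exact hcj ⟨by omega, by omega⟩
        rw [if_neg hcond]
    · rw [if_neg hci]
      apply List.map_congr_left
      intro j hj
      have hcond : ¬ (0 < (i : Int) ∧ (i : Int) < (A.length : Int) - 1 ∧
          0 < (j : Int) ∧ (j : Int) < ((A.getD 0 []).length : Int) - 1) := by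
        intro hcond
        exact hci ⟨by omega, by omega⟩
      rw [if_neg hcond]

-- (rectangular) slice-then-map equals a range comprehension
theorem pv_take_map {α β : Type} (r : List α) (w : ℕ) (hw : w ≤ r.length) (d : α) (f : α → β) :
    (r.take w).map f = (List.range w).map (fun j => f (r.getD j d)) := by
  apply List.ext_getElem
  · simp; omega
  · intro k hk hk'
    have hkw : k < w := by simpa using hk'
    have hkr : k < r.length := by omega
    simp [List.getElem_take, List.getD_eq_getElem?_getD, List.getElem?_eq_getElem hkr]

-- border/interior sandwich: head, flipped middle slice, last == a guarded range comprehension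
theorem pv_sandwich {α β : Type} (d : α) (f g : α → β) (xs : List α) (n : ℕ)
    (h3 : 3 ≤ n) (hn : n ≤ xs.length) :
    [f (xs.getD 0 d)] ++ ((xs.drop 1).take (n - 2)).map g ++ [f (xs.getD (n - 1) d)]
    = (List.range n).map (fun j => if 0 < j ∧ j < n - 1 then g (xs.getD j d) else f (xs.getD j d)) := by
  have hgd : ∀ (m : ℕ) (hm : m < xs.length), xs.getD m d = xs[m]'hm := by
    intro m hm
    simp [List.getD_eq_getElem?_getD, List.getElem?_eq_getElem hm]
  have hmlen : (((xs.drop 1).take (n - 2)).map g).length = n - 2 := by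
    simp; omega
  have h1len : ([f (xs.getD 0 d)] ++ ((xs.drop 1).take (n - 2)).map g).length = n - 1 := by
    simp only [List.length_append, List.length_cons, List.length_nil, hmlen]
    omega
  apply List.ext_getElem?
  intro k
  by_cases hkn : k < n
  · have hkx : k < xs.length := by omega
    have hkL : k < ([f (xs.getD 0 d)] ++ ((xs.drop 1).take (n - 2)).map g
        ++ [f (xs.getD (n - 1) d)]).length := by
      simp only [List.length_append, h1len, List.length_cons, List.length_nil]
      omega
    have hrhs : ((List.range n).map (fun j => if 0 < j ∧ j < n - 1 then g (xs.getD j d)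
        else f (xs.getD j d)))[k]? = some (if 0 < k ∧ k < n - 1 then g (xs.getD k d)
        else f (xs.getD k d)) := by
      rw [List.getElem?_eq_getElem (by simpa using hkn)]
      simp
    rw [hrhs]
    rcases Nat.lt_or_ge k (n - 1) with hkm | hkl
    · rw [List.getElem?_append_left (by omega)]
      rcases Nat.eq_zero_or_pos k with hk0 | hk1
      · subst hk0
        rw [List.getElem?_append_left (by simp)]
        simp
      · rw [List.getElem?_append_right (by simp; omega)]
        have hlen1 : [f (xs.getD 0 d)].length = 1 := rfl
        rw [hlen1,
            List.getElem?_eq_getElem (by omega : k - 1 < (((xs.drop 1).take (n - 2)).map g).length)]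
        have hin : k - 1 < ((xs.drop 1).take (n - 2)).length := by simp; omega
        have hval : (((xs.drop 1).take (n - 2)).map g)[k - 1]'(by omega)
            = g (xs[k]'hkx) := by
          rw [List.getElem_map, List.getElem_take, List.getElem_drop]
          congr 2
          omega
        rw [hval, hgd k hkx]
        have hc : 0 < k ∧ k < n - 1 := ⟨by omega, hkm⟩
        simp [hc]
    · have hke : k = n - 1 := by omega
      subst hke
      rw [List.getElem?_append_right (by omega)]
      rw [h1len, Nat.sub_self]
      simp
  · rw [List.getElem?_eq_none, List.getElem?_eq_none]
    · simp; omega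
    · simp only [List.length_append, h1len, List.length_cons, List.length_nil]
      omega

-- indexing a list by a range over its length
theorem pv_range_getD {α β : Type} (xs : List α) (d : α) (F : α → β) :
    (List.range xs.length).map (fun i => F (xs.getD i d)) = xs.map F := by
  apply List.ext_getElem
  · simp
  · intro k hk hk'
    have hkx : k < xs.length := by simpa using hk
    simp [List.getD_eq_getElem?_getD, List.getElem?_eq_getElem hkx]

-- B's port equals the canonical per-cell form (on Pre_)
theorem pv_alt_canon (A : List (List Int)) (hpre : Pre_innerReverse A) :
    innerReverse_alt A = pvCanon A := by
  obtain ⟨hne, hrows⟩ := hpre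
  have hlen : 0 < A.length := List.length_pos_of_ne_nil hne
  have hw : ∀ r ∈ A, (A.getD 0 []).length ≤ r.length := by
    intro r hr
    have : A.headD [] = A.getD 0 [] := by
      cases A with
      | nil => simp at hlen
      | cons a t => simp
    rw [← this]
    exact hrows r hr
  set w : ℕ := (A.getD 0 []).length with hwdef
  set h : ℕ := A.length with hhdef
  -- canonical form with Nat conditions
  have hcanon : pvCanon A = (List.range h).map (fun i =>
      if 0 < i ∧ i < h - 1 then
        (List.range w).map (fun j =>
          if 0 < j ∧ j < w - 1 then (if (A.getD i []).getD j 0 = 0 then (1 : Int) else 0)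
          else (if (A.getD i []).getD j 0 ≠ 0 then (1 : Int) else 0))
      else
        (List.range w).map (fun j => if (A.getD i []).getD j 0 ≠ 0 then (1 : Int) else 0)) := by
    rw [pvCanon]
    simp only [PySem.List.pyGetD_zero, PySem.List.pyRange_zero_natCast, List.map_map,
      Function.comp_def, PySem.List.pyGetD_natCast]
    apply List.map_congr_left
    intro i hi
    have hih : i < h := List.mem_range.mp hi
    by_cases hci : 0 < i ∧ i < h - 1
    · rw [if_pos hci]
      apply List.map_congr_left
      intro j hj
      have hjw : j < w := List.mem_range.mp hj
      by_cases hcj : 0 < j ∧ j < w - 1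
      · have hcint : 0 < (i : Int) ∧ (i : Int) < (h : Int) - 1 ∧
            0 < (j : Int) ∧ (j : Int) < (w : Int) - 1 := by
          obtain ⟨a1, a2⟩ := hci; obtain ⟨b1, b2⟩ := hcj
          refine ⟨by exact_mod_cast a1, by omega, by exact_mod_cast b1, by omega⟩
        rw [if_pos hcint, if_pos hcj]
        split_ifs <;> omega
      · have hcint : ¬ (0 < (i : Int) ∧ (i : Int) < (h : Int) - 1 ∧
            0 < (j : Int) ∧ (j : Int) < (w : Int) - 1) := by
          intro hc
          exact hcj ⟨by omega, by omega⟩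
        rw [if_neg hcint, if_neg hcj]
    · rw [if_neg hci]
      apply List.map_congr_left
      intro j hj
      have hcint : ¬ (0 < (i : Int) ∧ (i : Int) < (h : Int) - 1 ∧
          0 < (j : Int) ∧ (j : Int) < (w : Int) - 1) := by
        intro hc
        exact hci ⟨by omega, by omega⟩
      rw [if_neg hcint]
  -- per-row facts
  have hnorm : ∀ r ∈ A, altNorm (w : Int) r
      = (List.range w).map (fun j => if r.getD j 0 ≠ 0 then (1 : Int) else 0) := by
    intro r hr
    rw [altNorm, PySem.List.slice_to_natCast]
    exact pv_take_map r w (hw r hr) 0 _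
  have hmid : ∀ r ∈ A, altMid (w : Int) r
      = if (2 : Int) < w then
          (List.range w).map (fun j =>
            if 0 < j ∧ j < w - 1 then (if r.getD j 0 = 0 then (1 : Int) else 0)
            else (if r.getD j 0 ≠ 0 then (1 : Int) else 0))
        else altNorm (w : Int) r := by
    intro r hr
    by_cases h2 : (w : Int) ≤ 2
    · have h2n : ¬ ((2 : Int) < (w : Int)) := by omega
      rw [altMid, if_pos h2, if_neg h2n]
    · have h2p : (2 : Int) < (w : Int) := by omega
      rw [altMid, if_neg h2, if_pos h2p]
      have hw3 : 3 ≤ w := by omega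
      have hwr : w ≤ r.length := hw r hr
      have hcast1 : ((w : Int) - 1) = ((w - 1 : ℕ) : Int) := by omega
      rw [hcast1, PySem.List.pyGetD_natCast, PySem.List.pyGetD_zero,
          show (some (1 : Int)) = some (((1 : ℕ) : Int)) from rfl,
          PySem.List.slice_natCast]
      have htake : (w - 1 : ℕ) - 1 = w - 2 := by omega
      rw [htake]
      exact pv_sandwich 0 (fun x => if x ≠ 0 then (1 : Int) else 0)
        (fun x => if x = 0 then (1 : Int) else 0) r w hw3 hwr
  rw [hcanon, innerReverse_alt]
  simp only [PySem.List.pyGetD_zero, ← hwdef, ← hhdef]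
  by_cases hh2 : (h : Int) ≤ 2
  · rw [if_pos hh2]
    have : ∀ i ∈ List.range h, ¬ (0 < i ∧ i < h - 1) := by
      intro i hi hc
      have := List.mem_range.mp hi
      omega
    calc A.map (altNorm (w : Int))
        = A.map (fun r => (List.range w).map (fun j => if r.getD j 0 ≠ 0 then (1 : Int) else 0)) := by
          apply List.map_congr_left
          intro r hr
          exact hnorm r hr
      _ = (List.range h).map (fun i => (List.range w).map
            (fun j => if (A.getD i []).getD j 0 ≠ 0 then (1 : Int) else 0)) := by
          rw [hhdef]
          exact (pv_range_getD A [] (fun r => (List.range w).map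
            (fun j => if r.getD j 0 ≠ 0 then (1 : Int) else 0))).symm
      _ = _ := by
          symm
          apply List.map_congr_left
          intro i hi
          rw [if_neg (this i hi)]
  · rw [if_neg hh2]
    have hh3 : 3 ≤ h := by omega
    have hcast1 : ((h : Int) - 1) = ((h - 1 : ℕ) : Int) := by omega
    rw [hcast1, PySem.List.pyGetD_natCast,
        show (some (1 : Int)) = some (((1 : ℕ) : Int)) from rfl,
        PySem.List.slice_natCast]
    have htake : (h - 1 : ℕ) - 1 = h - 2 := by omega
    rw [htake]
    have hmid' : ∀ r ∈ A, altMid (w : Int) r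
        = (List.range w).map (fun j =>
            if 0 < j ∧ j < w - 1 then (if r.getD j 0 = 0 then (1 : Int) else 0)
            else (if r.getD j 0 ≠ 0 then (1 : Int) else 0)) := by
      intro r hr
      rw [hmid r hr]
      by_cases h2 : (2 : Int) < (w : Int)
      · rw [if_pos h2]
      · rw [if_neg h2, hnorm r hr]
        apply List.map_congr_left
        intro j hj
        have hjw := List.mem_range.mp hj
        have hnc : ¬ (0 < j ∧ j < w - 1) := by omega
        rw [if_neg hnc]
    have hmap : ((A.drop 1).take (h - 2)).map (altMid (w : Int))
        = ((A.drop 1).take (h - 2)).map (fun r => (List.range w).map (fun j =>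
            if 0 < j ∧ j < w - 1 then (if r.getD j 0 = 0 then (1 : Int) else 0)
            else (if r.getD j 0 ≠ 0 then (1 : Int) else 0))) := by
      apply List.map_congr_left
      intro r hr
      exact hmid' r (List.mem_of_mem_drop (List.mem_of_mem_take hr))
    have hmem0 : A.getD 0 [] ∈ A := by
      have h0 : A.getD 0 [] = A[0]'(by omega) := by
        simp [List.getD_eq_getElem?_getD,
          List.getElem?_eq_getElem (show 0 < A.length by omega)]
      rw [h0]
      exact List.getElem_mem _
    have hmem1 : A.getD (h - 1) [] ∈ A := by
      have h0 : A.getD (h - 1) [] = A[h - 1]'(by omega) := by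
        simp [List.getD_eq_getElem?_getD,
          List.getElem?_eq_getElem (show h - 1 < A.length by omega)]
      rw [h0]
      exact List.getElem_mem _
    rw [hmap, hnorm _ hmem0, hnorm _ hmem1]
    exact pv_sandwich ([] : List Int)
      (fun r => (List.range w).map
        (fun j => if r.getD j 0 ≠ 0 then (1 : Int) else 0))
      (fun r => (List.range w).map (fun j =>
        if 0 < j ∧ j < w - 1 then (if r.getD j 0 = 0 then (1 : Int) else 0)
        else (if r.getD j 0 ≠ 0 then (1 : Int) else 0)))
      A h hh3 (by omega)

-- ===== VERDICT (by name: the statement is the Claim_ definition above) =====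
theorem innerReverse_spec : Claim_equal_innerReverse := by
  intro A _ hpre
  unfold Spec_innerReverse
  rw [pv_innerReverse_canon, pv_alt_canon A hpre]
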